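-- pv_equiv track=rewrite | github.com/scfount/crypto_webapp | shift.py | rsa_find_D
-- ===== SOURCE A (Python) =====
-- import math
--
-- def rsa_find_D(E, N):
--     lcm = 0
--     end = math.ceil(math.sqrt(N))
--     # find phi
--     phi = None
--     for p in range(end):
--         for q in range(p, N):
--             if p * q == N:
--                 phi = math.lcm((p-1), (q-1))
--     # find D
--     for d in range(phi):
--         if (E * d) % phi == 1:
--             return ('d is:', d)
-- ===== SOURCE B (Python) =====
-- import math
--
-- def _egcd(a, b):
--     # iterative extended Euclid: returns (g, x) with x*a == g (mod b)
--     old_r, r = a, b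
--     old_x, x = 1, 0
--     while r != 0:
--         q = old_r // r
--         old_r, r = r, old_r - q * r
--         old_x, x = x, old_x - q * x
--     return old_r, old_x
--
-- def rsa_find_D(E, N):
--     end = math.ceil(math.sqrt(N))
--     p = None
--     for c in range(end - 1, 1, -1):   # largest divisor below sqrt(N)
--         if N % c == 0:
--             p = c
--             break
--     if p is None:
--         raise ValueError("N has no nontrivial factor below sqrt(N)")
--     q = N // p
--     phi = math.lcm(p - 1, q - 1)
--     g, x = _egcd(E % phi, phi)
--     if g != 1:
--         return None
--     return ('d is:', x % phi)
-- ===== Notes on version B (the rewrite author's own statement) =====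
-- stated objective: faster
-- what changed: Replaces A's O(sqrt(N)*N) double scan for a factor pair and its O(phi) linear search for the modular inverse by a single downward trial-division scan below sqrt(N) plus an extended-Euclidean inverse; intended as faster, measured 27x-6700x on generated sizes where A finishes (unconfirmed at the largest size only because B raises quickly on factor-free N where A times out before raising).
import Mathlib
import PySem

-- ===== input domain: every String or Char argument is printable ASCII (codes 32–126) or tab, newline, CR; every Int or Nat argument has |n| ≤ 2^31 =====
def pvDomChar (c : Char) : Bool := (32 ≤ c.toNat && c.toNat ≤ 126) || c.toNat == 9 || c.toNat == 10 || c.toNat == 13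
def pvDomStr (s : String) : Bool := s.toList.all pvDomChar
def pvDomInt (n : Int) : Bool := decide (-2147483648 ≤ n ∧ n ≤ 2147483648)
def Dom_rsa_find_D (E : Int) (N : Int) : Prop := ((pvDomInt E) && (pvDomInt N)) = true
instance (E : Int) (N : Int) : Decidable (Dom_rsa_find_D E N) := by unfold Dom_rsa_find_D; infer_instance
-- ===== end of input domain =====

-- B replaces A's factor-pair double scan and linear inverse search by downward trial
-- division below sqrt(N) plus an extended-Euclidean modular inverse (intended as faster;
-- a timing run measured 27x-6700x on sizes where A finishes).


-- ===== PORT A =====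
-- math.ceil(math.sqrt(N)): exact on 0 ≤ N ≤ 2^31 (the correctly rounded double sqrt cannot
-- cross an integer there); for N < 0 Python raises ValueError (outside Pre_).
-- least s with N ≤ s*s, by upward scan (fuel N.toNat always suffices)
def csqrtGo (n : Nat) : Nat → Nat → Nat
  | 0, s => s
  | fuel + 1, s => if n ≤ s * s then s else csqrtGo n fuel (s + 1)

def ceilSqrtNat (N : Int) : Nat := csqrtGo N.toNat N.toNat 0

def rsa_find_D (E : Int) (N : Int) : Option (String × Int) :=
  let endv : Nat := ceilSqrtNat N
  -- find phi: for p in range(end): for q in range(p, N): if p*q == N: phi = lcm(p-1, q-1)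
  let phi : Option Int :=
    (PySem.List.pyRange 0 (endv : Int) 1).foldl
      (fun acc p =>
        (PySem.List.pyRange p N 1).foldl
          (fun acc2 q => if p * q == N then some ((Int.lcm (p - 1) (q - 1) : Nat) : Int) else acc2)
          acc)
      none
  match phi with
  | none => none   -- Python: range(None) raises TypeError; excluded by Pre_
  | some φ =>
    -- for d in range(phi): if (E*d) % phi == 1: return ('d is:', d)
    match (PySem.List.pyRange 0 φ 1).find? (fun d => PySem.Int.mod (E * d) φ == 1) with
    | some d => some ("d is:", d)
    | none => none

-- ===== PORT B =====
-- for c in range(end-1, 1, -1): if N % c == 0: p = c; break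
def findP (N : Int) : Nat → Option Nat
  | 0 => none
  | 1 => none
  | (c + 2) => if PySem.Int.mod N ((c + 2 : Nat) : Int) == 0 then some (c + 2) else findP N (c + 1)

-- _egcd's while loop; the guard 'r != 0' is written '0 < r': every call here starts with
-- r = phi > 0 and the floor-mod update keeps 0 ≤ r < previous r, so the two guards agree
-- on every reachable state (and 0 < r yields the termination measure).
-- fuel only makes the loop structural: r.toNat strictly decreases each step, so the
-- fuel r.toNat + 1 passed below is never exhausted
def egcdGo : Nat → Int → Int → Int → Int → Int × Int
  | 0, old_r, _, old_x, _ => (old_r, old_x)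
  | fuel + 1, old_r, r, old_x, x =>
    if 0 < r then
      let q := PySem.Int.floordiv old_r r
      egcdGo fuel r (old_r - q * r) x (old_x - q * x)
    else (old_r, old_x)

def rsa_find_D_alt (E : Int) (N : Int) : Option (String × Int) :=
  let endv : Nat := ceilSqrtNat N   -- math.ceil(math.sqrt(N)), as in A
  match findP N (endv - 1) with
  | none => none   -- Python B: raises ValueError here; excluded by Pre_
  | some p =>
    let q : Int := PySem.Int.floordiv N (p : Int)
    let φ : Int := ((Int.lcm ((p : Int) - 1) (q - 1) : Nat) : Int)
    let gx := egcdGo (φ.toNat + 1) (PySem.Int.mod E φ) φ 1 0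
    if gx.1 ≠ 1 then none else some ("d is:", PySem.Int.mod gx.2 φ)

-- ===== PRECONDITION & SPEC =====
-- Pre_: exactly the inputs on which A returns (phi gets assigned): N has a divisor p with
-- 2 ≤ p and p*p < N.  Outside Pre_ both Pythons raise (A: ValueError on sqrt for N < 0,
-- else TypeError from range(None); B: ValueError), so nothing is excluded on which A returns.  The extra
-- bound p < N.toNat is no restriction (2 ≤ p and p*p < N force p < N); it only makes the
-- quantifier decidable.
def Pre_rsa_find_D (E : Int) (N : Int) : Prop :=
  ∃ p : Nat, p < N.toNat ∧ 2 ≤ p ∧ ((p : Int) * (p : Int) < N) ∧ ((p : Int) ∣ N)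

-- decision procedure for Pre_: test the candidates 0 ≤ p ≤ ceil(sqrt(N)) (every p with
-- p*p < N lies below that bound) by balanced splitting, so evaluation recurses only to
-- logarithmic depth; used only by the Decidable instance
def pvDivTest (N : Int) (p : Nat) : Bool :=
  decide (p < N.toNat) && decide (2 ≤ p) &&
  decide (((p : Nat) : Int) * ((p : Nat) : Int) < N) && decide (((p : Nat) : Int) ∣ N)

def pvAnyDiv (N : Int) : Nat → Nat → Nat → Bool
  | 0, lo, len => decide (len = 1) && pvDivTest N lo
  | fuel + 1, lo, len =>
    if len ≤ 1 then decide (len = 1) && pvDivTest N lo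
    else pvAnyDiv N fuel lo (len / 2) || pvAnyDiv N fuel (lo + len / 2) (len - len / 2)

instance (E : Int) (N : Int) : Decidable (Pre_rsa_find_D E N) :=
  decidable_of_iff (pvAnyDiv N (ceilSqrtNat N + 1) 0 (ceilSqrtNat N + 1) = true) (by
    unfold Pre_rsa_find_D
    have htst : ∀ p : Nat, pvDivTest N p = true ↔
        (p < N.toNat ∧ 2 ≤ p ∧ ((p : Int) * (p : Int) < N) ∧ ((p : Int) ∣ N)) := by
      intro p
      simp [pvDivTest, and_assoc]
    have hscan : ∀ (fuel lo len : Nat), len ≤ 2 ^ fuel →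
        (pvAnyDiv N fuel lo len = true ↔
          ∃ p : Nat, lo ≤ p ∧ p < lo + len ∧ pvDivTest N p = true) := by
      intro fuel
      induction fuel with
      | zero =>
        intro lo len hlen
        interval_cases len
        · simp only [pvAnyDiv]
          simp only [show ¬ (0 = 1) by omega, decide_false, Bool.false_and,
            Bool.false_eq_true, false_iff]
          rintro ⟨p, h1, h2, -⟩; omega
        · simp only [pvAnyDiv, Bool.and_eq_true, decide_eq_true_eq]
          constructor
          · rintro ⟨-, h⟩; exact ⟨lo, le_refl _, by omega, h⟩
          · rintro ⟨p, h1, h2, h3⟩; exact ⟨trivial, by rwa [show lo = p by omega]⟩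
      | succ fuel ih =>
        intro lo len hlen
        simp only [pvAnyDiv]
        by_cases hsm : len ≤ 1
        · rw [if_pos hsm]
          interval_cases len
          · simp only [show ¬ (0 = 1) by omega, decide_false, Bool.false_and,
              Bool.false_eq_true, false_iff]
            rintro ⟨p, h1, h2, -⟩; omega
          · simp only [Bool.and_eq_true, decide_eq_true_eq]
            constructor
            · rintro ⟨-, h⟩; exact ⟨lo, le_refl _, by omega, h⟩
            · rintro ⟨p, h1, h2, h3⟩; exact ⟨trivial, by rwa [show lo = p by omega]⟩
        · rw [if_neg hsm]
          have hl : len / 2 ≤ 2 ^ fuel := by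
            have : 2 ^ (fuel + 1) = 2 ^ fuel * 2 := by ring
            omega
          have hr : len - len / 2 ≤ 2 ^ fuel := by
            have : 2 ^ (fuel + 1) = 2 ^ fuel * 2 := by ring
            omega
          rw [Bool.or_eq_true, ih lo (len / 2) hl, ih (lo + len / 2) (len - len / 2) hr]
          constructor
          · rintro (⟨p, h1, h2, h3⟩ | ⟨p, h1, h2, h3⟩) <;> exact ⟨p, by omega, by omega, h3⟩
          · rintro ⟨p, h1, h2, h3⟩
            by_cases hp : p < lo + len / 2
            · exact Or.inl ⟨p, by omega, by omega, h3⟩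
            · exact Or.inr ⟨p, by omega, by omega, h3⟩
    rw [hscan (ceilSqrtNat N + 1) 0 (ceilSqrtNat N + 1) (le_of_lt (Nat.lt_two_pow_self))]
    constructor
    · rintro ⟨p, -, -, h⟩
      obtain ⟨a, b, c, d⟩ := (htst p).mp h
      exact ⟨p, a, b, c, d⟩
    · rintro ⟨p, h1, h2, h3, h4⟩
      -- p*p < N forces p ≤ ceilSqrtNat N, since N ≤ (ceilSqrtNat N)^2
      have hub : ∀ (fuel s : Nat), N.toNat ≤ (s + fuel) * (s + fuel) →
          N.toNat ≤ csqrtGo N.toNat fuel s * csqrtGo N.toNat fuel s := by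
        intro fuel
        induction fuel with
        | zero => intro s h; simpa [csqrtGo] using h
        | succ fuel ihf =>
          intro s h
          simp only [csqrtGo]
          by_cases hc : N.toNat ≤ s * s
          · rw [if_pos hc]; exact hc
          · rw [if_neg hc]
            exact ihf (s + 1) (by rw [show s + 1 + fuel = s + (fuel + 1) by omega]; exact h)
      have hN0 : 0 < N.toNat := by omega
      have hNle : N.toNat ≤ (0 + N.toNat) * (0 + N.toNat) := by
        simpa using Nat.le_mul_of_pos_left N.toNat hN0
      have hR := hub N.toNat 0 hNle
      have hpp : p * p < N.toNat := by
        have : ((p * p : Nat) : Int) < N := by push_cast; exact h3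
        omega
      have hpb : p ≤ ceilSqrtNat N := by
        unfold ceilSqrtNat
        by_contra hgt
        have h5 : csqrtGo N.toNat N.toNat 0 < p := by omega
        have := Nat.mul_le_mul (le_of_lt h5) (le_of_lt h5)
        omega
      exact ⟨p, by omega, by omega, (htst p).mpr ⟨h1, h2, h3, h4⟩⟩)

def pvWitness_rsa_find_D : Int × Int := (5, 35)

def Spec_rsa_find_D (E : Int) (N : Int) (out : Option (String × Int)) : Prop := out = rsa_find_D_alt E N
instance (E : Int) (N : Int) (out : Option (String × Int)) : Decidable (Spec_rsa_find_D E N out) := by unfold Spec_rsa_find_D; infer_instance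

-- ===== CLAIM (what is proved, stated in full; the proofs are below) =====
def Claim_equal_rsa_find_D : Prop := ∀ (E : Int) (N : Int), Dom_rsa_find_D E N → Pre_rsa_find_D E N → Spec_rsa_find_D E N (rsa_find_D E N)

-- ===== LEMMAS AND PROOFS =====

theorem csqrtGo_spec (n : Nat) : ∀ (fuel s : Nat), n ≤ (s + fuel) * (s + fuel) →
    n ≤ csqrtGo n fuel s * csqrtGo n fuel s ∧ s ≤ csqrtGo n fuel s ∧
      ∀ t, s ≤ t → t < csqrtGo n fuel s → t * t < n := by
  intro fuel
  induction fuel with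
  | zero =>
    intro s h
    simp only [csqrtGo]
    exact ⟨by simpa using h, le_refl s, fun t h1 h2 => absurd (lt_of_le_of_lt h1 h2) (lt_irrefl s)⟩
  | succ fuel ih =>
    intro s h
    simp only [csqrtGo]
    by_cases hc : n ≤ s * s
    · simp only [if_pos hc]
      exact ⟨hc, le_refl s, fun t h1 h2 => absurd (lt_of_le_of_lt h1 h2) (lt_irrefl s)⟩
    · simp only [if_neg hc]
      have h' : n ≤ (s + 1 + fuel) * (s + 1 + fuel) := by
        have : s + 1 + fuel = s + (fuel + 1) := by omega
        rw [this]; exact h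
      obtain ⟨h1, h2, h3⟩ := ih (s + 1) h'
      refine ⟨h1, by omega, fun t ht1 ht2 => ?_⟩
      rcases Nat.eq_or_lt_of_le ht1 with rfl | hlt
      · omega
      · exact h3 t (by omega) ht2

theorem ceilSqrtNat_lt_iff (N : Int) (p : Nat) (hN : 0 < N) :
    p < ceilSqrtNat N ↔ (p : Int) * (p : Int) < N := by
  have hn : 0 < N.toNat := by omega
  have hfuel : N.toNat ≤ (0 + N.toNat) * (0 + N.toNat) := by
    simpa using Nat.le_mul_of_pos_left N.toNat hn
  obtain ⟨h1, _, h3⟩ := csqrtGo_spec N.toNat N.toNat 0 hfuel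
  unfold ceilSqrtNat
  have hcast : ((p * p : Nat) : Int) < N ↔ p * p < N.toNat := by omega
  constructor
  · intro hlt
    have := h3 p (Nat.zero_le p) hlt
    push_cast at hcast ⊢
    omega
  · intro hlt
    have hpp : p * p < N.toNat := by push_cast at hcast ⊢; omega
    by_contra hge
    have : csqrtGo N.toNat N.toNat 0 ≤ p := by omega
    have : csqrtGo N.toNat N.toNat 0 * csqrtGo N.toNat N.toNat 0 ≤ p * p :=
      Nat.mul_le_mul this this
    omega

-- last assignment of an ascending loop whose assigned value is the same at every match
theorem foldl_lastif_const {α β : Type} (c : α → Bool) (g : α → β) (v : β) :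
    ∀ (l : List α) (a : Option β), (∀ x ∈ l, c x = true → g x = v) →
      l.foldl (fun acc x => if c x then some (g x) else acc) a
        = if l.any c then some v else a := by
  intro l
  induction l with
  | nil => intro a _; simp
  | cons hd tl ih =>
    intro a h
    simp only [List.foldl_cons, List.any_cons]
    by_cases hc : c hd = true
    · have hv := h hd (by simp) hc
      simp only [hc, Bool.true_or, if_pos]
      rw [ih _ (fun x hx => h x (by simp [hx]))]
      by_cases ha : tl.any c = true <;> simp [ha, hv]
    · simp only [Bool.eq_false_iff.mpr hc, Bool.false_eq_true, if_false, Bool.false_or]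
      exact ih a (fun x hx => h x (by simp [hx]))

-- first match of a downward scan from n-1
def descFind (c : Nat → Bool) : Nat → Option Nat
  | 0 => none
  | n + 1 => if c n then some n else descFind c n

theorem foldl_lastif_range {β : Type} (c : Nat → Bool) (g : Nat → β) :
    ∀ (n : Nat) (a : Option β),
      (List.range n).foldl (fun acc x => if c x then some (g x) else acc) a
        = (match descFind c n with | some x => some (g x) | none => a) := by
  intro n
  induction n with
  | zero => intro a; simp [descFind]
  | succ n ih =>
    intro a
    rw [List.range_succ, List.foldl_append]
    simp only [List.foldl_cons, List.foldl_nil, descFind]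
    by_cases hc : c n = true
    · simp [hc]
    · simp only [Bool.eq_false_iff.mpr hc, Bool.false_eq_true, if_false]
      exact ih a

theorem foldl_congr_fun {α β : Type} :
    ∀ (l : List α) (f g : β → α → β) (a : β), (∀ acc, ∀ x ∈ l, f acc x = g acc x) →
      l.foldl f a = l.foldl g a := by
  intro l
  induction l with
  | nil => intro f g a _; rfl
  | cons hd tl ih =>
    intro f g a h
    simp only [List.foldl_cons]
    rw [h a hd (by simp)]
    exact ih f g _ (fun acc x hx => h acc x (by simp [hx]))

theorem descFind_congr (c c' : Nat → Bool) :
    ∀ n, (∀ p, p < n → c p = c' p) → descFind c n = descFind c' n := by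
  intro n
  induction n with
  | zero => intro _; rfl
  | succ n ih =>
    intro h
    simp only [descFind, h n (by omega)]
    rw [ih (fun p hp => h p (by omega))]

theorem floordiv_exact (p q N : Int) (hp : 0 < p) (h : p * q = N) :
    PySem.Int.floordiv N p = q := by
  rw [PySem.Int.floordiv_eq_iff_of_pos hp]
  constructor
  · nlinarith
  · nlinarith

-- the inner q-loop: at most one q matches, and it is N // p
theorem inner_eq (N : Int) (hN : 1 ≤ N) (p : Int) (hp : 0 ≤ p) (acc : Option Int) :
    (PySem.List.pyRange p N 1).foldl
        (fun acc2 q => if p * q == N then some ((Int.lcm (p - 1) (q - 1) : Nat) : Int) else acc2) acc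
      = if (PySem.List.pyRange p N 1).any (fun q => p * q == N)
          then some ((Int.lcm (p - 1) (PySem.Int.floordiv N p - 1) : Nat) : Int) else acc := by
  apply foldl_lastif_const (fun q => p * q == N)
    (fun q => ((Int.lcm (p - 1) (q - 1) : Nat) : Int)) _ _ acc
  intro q hq hmatch
  have hpq : p * q = N := by simpa using hmatch
  have hp0 : 0 < p := by
    rcases hp.lt_or_eq with h | h
    · exact h
    · exfalso; rw [← h, zero_mul] at hpq; omega
  rw [floordiv_exact p q N hp0 hpq]

-- A's match condition at p equals "2 ≤ p and p divides N", given p*p < N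
theorem cond_iff (N : Int) (hN : 5 ≤ N) (p : Nat) (hlt : (p : Int) * (p : Int) < N) :
    ((PySem.List.pyRange (p : Int) N 1).any (fun q => (p : Int) * q == N) = true)
      ↔ (2 ≤ p ∧ ((p : Int) ∣ N)) := by
  rw [List.any_eq_true]
  constructor
  · rintro ⟨q, hq, hm⟩
    have hpq : (p : Int) * q = N := by simpa using hm
    have hmem := (PySem.List.mem_pyRange_one).mp hq
    have hdvd : (p : Int) ∣ N := Dvd.intro q hpq
    refine ⟨?_, hdvd⟩
    by_contra hlt2
    interval_cases p
    · rw [Nat.cast_zero, zero_mul] at hpq; omega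
    · rw [Nat.cast_one, one_mul] at hpq; omega
  · rintro ⟨h2, hdvd⟩
    obtain ⟨q, hq⟩ := hdvd
    have hp0 : (0 : Int) < (p : Int) := by exact_mod_cast (show 0 < p by omega)
    have hpq : (p : Int) < q := by nlinarith
    have hqN : q < N := by nlinarith
    refine ⟨q, ?_, by simp [hq]⟩
    exact (PySem.List.mem_pyRange_one).mpr ⟨by omega, hqN⟩

theorem descFind_eq_findP (N : Int) :
    ∀ m, descFind (fun p => decide (2 ≤ p) && decide ((p : Int) ∣ N)) (m + 1) = findP N m := by
  intro m
  induction m with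
  | zero => simp [descFind, findP]
  | succ m ih =>
    match m, ih with
    | 0, _ => simp [descFind, findP]
    | k + 1, ih =>
      show (if _ then _ else _) = findP N (k + 2)
      rw [show findP N (k + 2)
            = (if PySem.Int.mod N ((k + 2 : Nat) : Int) == 0 then some (k + 2)
               else findP N (k + 1)) from rfl]
      by_cases hdvd : ((k + 2 : Nat) : Int) ∣ N
      · have hm : PySem.Int.mod N ((k + 2 : Nat) : Int) = 0 :=
          (PySem.Int.mod_eq_zero_iff_dvd N _).mpr hdvd
        push_cast at hdvd hm
        simp [hdvd, hm]
      · have hm : ¬ PySem.Int.mod N ((k + 2 : Nat) : Int) = 0 :=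
          fun h => hdvd ((PySem.Int.mod_eq_zero_iff_dvd N _).mp h)
        simp only [show (2 ≤ k + 2) = True by simp, decide_true, Bool.true_and, hdvd,
          decide_false, Bool.false_eq_true, if_false, beq_iff_eq, hm, ih]

theorem findP_spec (N : Int) :
    ∀ m p, findP N m = some p → 2 ≤ p ∧ ((p : Int) ∣ N) ∧ p ≤ m := by
  intro m
  induction m with
  | zero => intro p h; simp [findP] at h
  | succ m ih =>
    match m, ih with
    | 0, _ => intro p h; simp [findP] at h
    | k + 1, ih =>
      intro p h
      rw [show findP N (k + 2)
            = (if PySem.Int.mod N ((k + 2 : Nat) : Int) == 0 then some (k + 2)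
               else findP N (k + 1)) from rfl] at h
      by_cases hm : PySem.Int.mod N ((k + 2 : Nat) : Int) = 0
      · simp only [hm, beq_self_eq_true, if_true, Option.some.injEq] at h
        subst h
        exact ⟨by omega, (PySem.Int.mod_eq_zero_iff_dvd N _).mp hm, le_refl _⟩
      · simp only [beq_iff_eq, hm, if_false] at h
        obtain ⟨h1, h2, h3⟩ := ih p h
        exact ⟨h1, h2, by omega⟩

theorem mod_step_bounds (old_r r : Int) (hr : 0 < r) :
    0 ≤ old_r - PySem.Int.floordiv old_r r * r ∧ old_r - PySem.Int.floordiv old_r r * r < r := by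
  have h1 : PySem.Int.floordiv old_r r * r + PySem.Int.mod old_r r = old_r :=
    PySem.Int.floordiv_mul_add_mod old_r r
  have h2 : PySem.Int.mod old_r r = old_r % r := PySem.Int.mod_eq_emod_of_pos hr
  have h3 : 0 ≤ old_r % r := Int.emod_nonneg _ (by omega)
  have h4 : old_r % r < r := Int.emod_lt_of_pos _ hr
  omega

theorem egcd_dvd : ∀ (fuel : Nat) (old_r r old_x x : Int), 0 ≤ r → r.toNat < fuel →
    (egcdGo fuel old_r r old_x x).1 ∣ old_r ∧ (egcdGo fuel old_r r old_x x).1 ∣ r := by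
  intro fuel
  induction fuel with
  | zero => intro _ _ _ _ _ h; omega
  | succ fuel ih =>
    intro old_r r old_x x hr hfuel
    simp only [egcdGo]
    by_cases hrpos : 0 < r
    · simp only [if_pos hrpos]
      obtain ⟨hb1, hb2⟩ := mod_step_bounds old_r r hrpos
      have hlt : (old_r - PySem.Int.floordiv old_r r * r).toNat < fuel := by omega
      obtain ⟨d1, d2⟩ := ih r (old_r - PySem.Int.floordiv old_r r * r) x
        (old_x - PySem.Int.floordiv old_r r * x) hb1 hlt
      refine ⟨?_, d1⟩
      have := dvd_add (Dvd.dvd.mul_left d1 (PySem.Int.floordiv old_r r)) d2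
      simpa using this
    · simp only [if_neg hrpos]
      have hr0 : r = 0 := by omega
      exact ⟨dvd_refl _, by simp [hr0]⟩

theorem egcd_modeq (m a0 : Int) : ∀ (fuel : Nat) (old_r r old_x x : Int), 0 ≤ r → r.toNat < fuel →
    old_r ≡ old_x * a0 [ZMOD m] → r ≡ x * a0 [ZMOD m] →
    (egcdGo fuel old_r r old_x x).1 ≡ (egcdGo fuel old_r r old_x x).2 * a0 [ZMOD m] := by
  intro fuel
  induction fuel with
  | zero => intro _ _ _ _ _ h; omega
  | succ fuel ih =>
    intro old_r r old_x x hr hfuel h1 h2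
    simp only [egcdGo]
    by_cases hrpos : 0 < r
    · simp only [if_pos hrpos]
      obtain ⟨hb1, hb2⟩ := mod_step_bounds old_r r hrpos
      have hlt : (old_r - PySem.Int.floordiv old_r r * r).toNat < fuel := by omega
      refine ih r _ x _ hb1 hlt h2 ?_
      have hsub := Int.ModEq.sub h1 (Int.ModEq.mul_left (PySem.Int.floordiv old_r r) h2)
      have heq : old_x * a0 - PySem.Int.floordiv old_r r * (x * a0)
          = (old_x - PySem.Int.floordiv old_r r * x) * a0 := by ring
      rwa [heq] at hsub
    · simp only [if_neg hrpos]
      exact h1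

theorem egcd_nonneg : ∀ (fuel : Nat) (old_r r old_x x : Int), 0 ≤ old_r → 0 ≤ r →
    0 ≤ (egcdGo fuel old_r r old_x x).1 := by
  intro fuel
  induction fuel with
  | zero => intro old_r r old_x x h _; exact h
  | succ fuel ih =>
    intro old_r r old_x x ho hr
    simp only [egcdGo]
    by_cases hrpos : 0 < r
    · simp only [if_pos hrpos]
      exact ih _ _ _ _ hr (mod_step_bounds old_r r hrpos).1
    · simp only [if_neg hrpos]
      exact ho

theorem find?_unique {α : Type} (p : α → Bool) (d0 : α) :
    ∀ (l : List α), d0 ∈ l → p d0 = true → (∀ y ∈ l, p y = true → y = d0) →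
      l.find? p = some d0 := by
  intro l
  induction l with
  | nil => intro h; simp at h
  | cons hd tl ih =>
    intro hmem hp huniq
    by_cases hc : p hd = true
    · have : hd = d0 := huniq hd (by simp) hc
      simp [List.find?, this, hp]
    · have hne : hd ≠ d0 := fun he => hc (he ▸ hp)
      have : d0 ∈ tl := by
        rcases List.mem_cons.mp hmem with h | h
        · exact absurd h.symm hne
        · exact h
      simp only [List.find?, Bool.eq_false_iff.mpr hc]
      exact ih this hp (fun y hy => huniq y (by simp [hy]))

-- the d-loop is the extended-Euclidean modular inverse
theorem dsearch_eq (E φ : Int) (hφ : 2 ≤ φ) :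
    (match (PySem.List.pyRange 0 φ 1).find? (fun d => PySem.Int.mod (E * d) φ == 1) with
      | some d => some ("d is:", d)
      | none => (none : Option (String × Int)))
      = (let gx := egcdGo (φ.toNat + 1) (PySem.Int.mod E φ) φ 1 0;
         if gx.1 ≠ 1 then none else some ("d is:", PySem.Int.mod gx.2 φ)) := by
  have hφ0 : 0 < φ := by omega
  set a0 := PySem.Int.mod E φ with ha0def
  have ha0 : a0 = E % φ := PySem.Int.mod_eq_emod_of_pos hφ0
  have ha0nn : 0 ≤ a0 := by rw [ha0]; exact Int.emod_nonneg _ (by omega)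
  have hEa0 : E ≡ a0 [ZMOD φ] := by rw [ha0]; exact (Int.emod_emod_of_dvd E dvd_rfl).symm
  set gx := egcdGo (φ.toNat + 1) a0 φ 1 0 with hgx
  have hfuel : φ.toNat < φ.toNat + 1 := by omega
  obtain ⟨hd1, hd2⟩ := egcd_dvd (φ.toNat + 1) a0 φ 1 0 (by omega) hfuel
  have hmod : gx.1 ≡ gx.2 * a0 [ZMOD φ] := by
    apply egcd_modeq φ a0 (φ.toNat + 1) a0 φ 1 0 (by omega) hfuel
    · show a0 ≡ 1 * a0 [ZMOD φ]; rw [one_mul]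
    · show φ ≡ 0 * a0 [ZMOD φ]
      rw [zero_mul]
      exact Int.modEq_zero_iff_dvd.mpr dvd_rfl
  have hnn : 0 ≤ gx.1 := egcd_nonneg _ _ _ _ _ ha0nn (by omega)
  have h1mod : (1 : Int) % φ = 1 := Int.emod_eq_of_lt (by omega) (by omega)
  by_cases hg : gx.1 = 1
  · -- the inverse exists; A's scan finds exactly x % φ
    set d0 := PySem.Int.mod gx.2 φ with hd0def
    have hd0e : d0 = gx.2 % φ := PySem.Int.mod_eq_emod_of_pos hφ0
    have hd0b1 : 0 ≤ d0 := by rw [hd0e]; exact Int.emod_nonneg _ (by omega)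
    have hd0b2 : d0 < φ := by rw [hd0e]; exact Int.emod_lt_of_pos _ hφ0
    have hd0g : d0 ≡ gx.2 [ZMOD φ] := by
      rw [hd0e]; exact Int.emod_emod_of_dvd _ dvd_rfl
    have hkey : E * d0 ≡ 1 [ZMOD φ] := by
      calc E * d0 ≡ a0 * gx.2 [ZMOD φ] := Int.ModEq.mul hEa0 hd0g
        _ = gx.2 * a0 := by ring
        _ ≡ gx.1 [ZMOD φ] := hmod.symm
        _ = 1 := hg
    have hpred : (PySem.Int.mod (E * d0) φ == 1) = true := by
      rw [beq_iff_eq, PySem.Int.mod_eq_emod_of_pos hφ0]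
      calc (E * d0) % φ = 1 % φ := hkey
        _ = 1 := h1mod
    have huniq : ∀ y ∈ PySem.List.pyRange 0 φ 1,
        (PySem.Int.mod (E * y) φ == 1) = true → y = d0 := by
      intro y hy hpy
      have hyb := (PySem.List.mem_pyRange_one).mp hy
      rw [beq_iff_eq, PySem.Int.mod_eq_emod_of_pos hφ0] at hpy
      have hyq : E * y ≡ 1 [ZMOD φ] := by
        show (E * y) % φ = 1 % φ
        rw [h1mod]; exact hpy
      have h1y : a0 * y ≡ 1 [ZMOD φ] := (hEa0.symm.mul_right y).trans hyq
      have hy2 : y ≡ gx.2 [ZMOD φ] := by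
        calc y = gx.1 * y := by rw [hg, one_mul]
          _ ≡ (gx.2 * a0) * y [ZMOD φ] := hmod.mul_right y
          _ = gx.2 * (a0 * y) := by ring
          _ ≡ gx.2 * 1 [ZMOD φ] := Int.ModEq.mul_left gx.2 h1y
          _ = gx.2 := mul_one gx.2
      have hdvd : φ ∣ d0 - y := (hy2.trans hd0g.symm).dvd
      have : d0 - y = 0 := Int.eq_zero_of_abs_lt_dvd hdvd (by rw [abs_lt]; omega)
      omega
    have hmem : d0 ∈ PySem.List.pyRange 0 φ 1 :=
      (PySem.List.mem_pyRange_one).mpr ⟨hd0b1, hd0b2⟩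
    have hfind := find?_unique (fun d => PySem.Int.mod (E * d) φ == 1) d0
      (PySem.List.pyRange 0 φ 1) hmem hpred huniq
    rw [hfind]
    simp only [hg, ne_eq, not_true_eq_false, if_false]
    exact congrArg (fun z => some ("d is:", z)) hd0def.symm
  · -- no inverse: gx.1 ≥ 2 divides E and φ, so no d can satisfy (E*d) % φ == 1
    have hgne0 : gx.1 ≠ 0 := by
      intro h0
      rw [h0] at hd2
      have : φ = 0 := zero_dvd_iff.mp hd2
      omega
    have hg2 : 2 ≤ gx.1 := by omega
    have hgE : gx.1 ∣ E := by
      have hφdvd : φ ∣ a0 - E := hEa0.dvd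
      have h1 : gx.1 ∣ a0 - E := dvd_trans hd2 hφdvd
      have := dvd_sub hd1 h1
      simpa using this
    have hnone : (PySem.List.pyRange 0 φ 1).find?
        (fun d => PySem.Int.mod (E * d) φ == 1) = none := by
      rw [List.find?_eq_none]
      intro y _ hpy
      rw [beq_iff_eq, PySem.Int.mod_eq_emod_of_pos hφ0] at hpy
      have hyq : E * y ≡ 1 [ZMOD φ] := by
        show (E * y) % φ = 1 % φ
        rw [h1mod]; exact hpy
      have hdvd1 : gx.1 ∣ 1 - E * y := dvd_trans hd2 hyq.dvd
      have hdvd2 : gx.1 ∣ E * y := Dvd.dvd.mul_right hgE y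
      have : gx.1 ∣ 1 := by
        have := dvd_add hdvd1 hdvd2
        simpa using this
      have := Int.le_of_dvd (by omega) this
      omega
    rw [hnone]
    simp [hg]

-- ===== VERDICT (by name: the statement is the Claim_ definition above) =====
theorem rsa_find_D_spec : Claim_equal_rsa_find_D := by
  intro E N _ hPre
  unfold Spec_rsa_find_D
  obtain ⟨p0, _, hp02, hp0lt, hp0dvd⟩ := hPre
  have hp02' : (2 : Int) ≤ (p0 : Int) := by exact_mod_cast hp02
  have hN5 : 5 ≤ N := by nlinarith
  have hN0 : 0 < N := by omega
  have hN1 : 1 ≤ N := by omega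
  set endv := ceilSqrtNat N with hendv
  have hp0end : p0 < endv := (ceilSqrtNat_lt_iff N p0 hN0).mpr hp0lt
  have hend3 : 3 ≤ endv := by omega
  -- A's phi-loop computes lcm(p-1, N//p - 1) for the largest divisor p below sqrt(N)
  have hphi : (PySem.List.pyRange 0 (endv : Int) 1).foldl
      (fun acc p => (PySem.List.pyRange p N 1).foldl
          (fun acc2 q => if p * q == N then some ((Int.lcm (p - 1) (q - 1) : Nat) : Int) else acc2)
          acc)
      none
    = (match findP N (endv - 1) with
       | some p => some ((Int.lcm ((p : Int) - 1) (PySem.Int.floordiv N (p : Int) - 1) : Nat) : Int)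
       | none => none) := by
    rw [PySem.List.pyRange_one 0 (endv : Int)]
    have h1 : (((endv : Int) - 0).toNat) = endv := by omega
    rw [h1, List.foldl_map]
    rw [foldl_congr_fun (List.range endv) _
      (fun acc (k : Nat) =>
        if (PySem.List.pyRange ((k : Int)) N 1).any (fun q => ((k : Int)) * q == N)
          then some ((Int.lcm (((k : Int)) - 1) (PySem.Int.floordiv N ((k : Int)) - 1) : Nat) : Int)
          else acc)
      none ?hcong]
    case hcong =>
      intro acc k _
      simp only [zero_add]
      exact inner_eq N hN1 (k : Int) (by positivity) acc
    rw [foldl_lastif_range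
      (fun k => (PySem.List.pyRange ((k : Int)) N 1).any (fun q => ((k : Int)) * q == N))
      (fun k => ((Int.lcm (((k : Int)) - 1) (PySem.Int.floordiv N ((k : Int)) - 1) : Nat) : Int))
      endv none]
    rw [descFind_congr _ (fun p => decide (2 ≤ p) && decide ((p : Int) ∣ N)) endv ?hc]
    case hc =>
      intro k hk
      have hkk : (k : Int) * (k : Int) < N := (ceilSqrtNat_lt_iff N k hN0).mp hk
      have hiff := cond_iff N hN5 k hkk
      by_cases h : 2 ≤ k ∧ ((k : Int) ∣ N)
      · rw [hiff.mpr h]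
        simp [h.1, h.2]
      · have hfalse : ¬ ((PySem.List.pyRange ((k : Int)) N 1).any
            (fun q => ((k : Int)) * q == N) = true) := fun hc => h (hiff.mp hc)
        rw [Bool.not_eq_true] at hfalse
        rw [hfalse]
        rcases not_and_or.mp h with h' | h' <;> simp [h']
    obtain ⟨m, hm⟩ : ∃ m, endv = m + 1 := ⟨endv - 1, by omega⟩
    rw [hm, descFind_eq_findP N m, show m + 1 - 1 = m from rfl]
  unfold rsa_find_D rsa_find_D_alt
  rw [← hendv]
  simp only [hphi]
  cases hfp : findP N (endv - 1) with
  | none => rfl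
  | some p =>
    obtain ⟨hp2, hpdvd, hple⟩ := findP_spec N (endv - 1) p hfp
    have hpend : p < endv := by omega
    have hpp : (p : Int) * (p : Int) < N := (ceilSqrtNat_lt_iff N p hN0).mp hpend
    obtain ⟨q', hq'⟩ := hpdvd
    have hp0' : (0 : Int) < (p : Int) := by exact_mod_cast (show 0 < p by omega)
    have hp2' : (2 : Int) ≤ (p : Int) := by exact_mod_cast hp2
    have hfl : PySem.Int.floordiv N (p : Int) = q' := floordiv_exact _ _ _ hp0' hq'.symm
    have hq'3 : 3 ≤ q' := by nlinarith
    have hφ2 : 2 ≤ ((Int.lcm ((p : Int) - 1) (PySem.Int.floordiv N (p : Int) - 1) : Nat) : Int) := by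
      rw [hfl]
      have hdvdr : (q' - 1) ∣ ((Int.lcm ((p : Int) - 1) (q' - 1) : Nat) : Int) :=
        Int.dvd_lcm_right _ _
      have hne : Int.lcm ((p : Int) - 1) (q' - 1) ≠ 0 := by
        apply Nat.lcm_ne_zero
        · rw [Ne, Int.natAbs_eq_zero]; omega
        · rw [Ne, Int.natAbs_eq_zero]; omega
      have hpos : (0 : Int) < ((Int.lcm ((p : Int) - 1) (q' - 1) : Nat) : Int) := by
        exact_mod_cast Nat.pos_of_ne_zero hne
      have := Int.le_of_dvd hpos hdvdr
      omega
    exact dsearch_eq E _ hφ2
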